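-- pv_equiv track=rewrite | github.com/smaht-dac/smaht-portal | src/encoded/tests/utils.py | get_conditional_requirements
-- ===== SOURCE A (Python) =====
-- from typing import Any, Dict, List, Optional, Union
--
-- def get_conditional_requirements(
--     conditional_options: List[Dict[str, Any]]
-- ) -> List[str]:
--     """Get required fields from conditional properties."""
--     return [
--         required_key
--         for entry in conditional_options
--         for key, value in entry.items()
--         for required_key in value
--         if key == "required"
--     ]
-- ===== SOURCE B (Python) =====
-- from typing import Any, Dict, List, Optional, Union
--
-- def get_conditional_requirements(
--     conditional_options: List[Dict[str, Any]]
-- ) -> List[str]: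
--     """Get required fields from conditional properties."""
--     if not conditional_options:
--         return []
--     head, rest = conditional_options[0], conditional_options[1:]
--     return list(head.get("required", [])) + get_conditional_requirements(rest)
-- ===== Notes on version B (the rewrite author's own statement) =====
-- stated objective: alternative
-- what changed: Replaces the triple-nested comprehension scanning every (key, value) pair with a head/rest structural recursion that concatenates the head dict's value under 'required' (empty default via .get) with the recursive result on the tail.
import Mathlib
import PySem

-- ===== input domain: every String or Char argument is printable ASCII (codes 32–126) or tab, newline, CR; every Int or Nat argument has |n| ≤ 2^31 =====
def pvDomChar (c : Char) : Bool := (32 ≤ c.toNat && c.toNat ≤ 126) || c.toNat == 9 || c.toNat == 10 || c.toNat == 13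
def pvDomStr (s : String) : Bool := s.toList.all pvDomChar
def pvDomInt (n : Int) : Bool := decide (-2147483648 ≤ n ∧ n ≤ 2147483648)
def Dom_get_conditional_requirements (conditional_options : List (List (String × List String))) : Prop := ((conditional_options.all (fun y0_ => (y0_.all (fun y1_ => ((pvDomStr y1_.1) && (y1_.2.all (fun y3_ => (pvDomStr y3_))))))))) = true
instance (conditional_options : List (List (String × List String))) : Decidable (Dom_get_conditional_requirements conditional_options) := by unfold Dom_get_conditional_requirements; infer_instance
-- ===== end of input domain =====

-- B replaces A's triple-nested comprehension (a scan over every key/value pair)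
-- with a head/rest structural recursion using one dict .get per entry: an alternative decomposition.


-- ===== PORT A =====
-- [required_key for entry in conditional_options for key, value in entry.items()
--  for required_key in value if key == "required"]
def get_conditional_requirements (conditional_options : List (List (String × List String))) : List String :=
  conditional_options.flatMap (fun entry =>
    entry.flatMap (fun kv =>
      kv.2.filterMap (fun required_key =>
        if kv.1 == "required" then some required_key else none)))

-- ===== PORT B =====
-- if not co: return []; head, rest = co[0], co[1:]
-- return list(head.get("required", [])) + get_conditional_requirements(rest)
def get_conditional_requirements_alt (conditional_options : List (List (String × List String))) : List String :=
  match conditional_options with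
  | [] => []
  | head :: rest =>
      (PySem.Dict.mk head).getD "required" [] ++ get_conditional_requirements_alt rest

-- ===== PRECONDITION & SPEC =====
-- Pre_ states the Python-dict representation invariant: each entry is an association
-- list standing for a dict, so its keys are distinct (every Python input satisfies this).
def Pre_get_conditional_requirements (conditional_options : List (List (String × List String))) : Prop :=
  ∀ entry ∈ conditional_options, (entry.map Prod.fst).Nodup
instance (conditional_options : List (List (String × List String))) : Decidable (Pre_get_conditional_requirements conditional_options) := by unfold Pre_get_conditional_requirements; infer_instance
def pvWitness_get_conditional_requirements : (List (List (String × List String))) :=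
  [[("required", ["a", "b"]), ("x", ["c"])], [("y", ["d"])]]
def Spec_get_conditional_requirements (conditional_options : List (List (String × List String))) (out : List String) : Prop := out = get_conditional_requirements_alt conditional_options
instance (conditional_options : List (List (String × List String))) (out : List String) : Decidable (Spec_get_conditional_requirements conditional_options out) := by unfold Spec_get_conditional_requirements; infer_instance

-- ===== CLAIM (what is proved, stated in full; the proofs are below) =====
def Claim_equal_get_conditional_requirements : Prop := ∀ (conditional_options : List (List (String × List String))), Dom_get_conditional_requirements conditional_options → Pre_get_conditional_requirements conditional_options → Spec_get_conditional_requirements conditional_options (get_conditional_requirements conditional_options)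

-- ===== LEMMAS AND PROOFS =====

-- On an entry with distinct keys, A's items-scan filtered by key == "required"
-- yields exactly the dict's value at "required" (or [] when absent).
theorem pv_entry_eq (entry : List (String × List String))
    (h : (entry.map Prod.fst).Nodup) :
    entry.flatMap (fun kv =>
      kv.2.filterMap (fun required_key =>
        if kv.1 == "required" then some required_key else none)) =
    (PySem.Dict.mk entry).getD "required" [] := by
  induction entry with
  | nil => rfl
  | cons kv rest ih =>
    simp only [List.map_cons, List.nodup_cons] at h
    rw [List.flatMap_cons]
    by_cases hk : kv.1 = "required"
    · have hrest : rest.flatMap (fun kv =>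
          kv.2.filterMap (fun required_key =>
            if kv.1 == "required" then some required_key else none)) = [] := by
        apply List.flatMap_eq_nil_iff.mpr
        intro x hx
        have hne : x.1 ≠ "required" := fun he => h.1 (hk ▸ he ▸ List.mem_map.mpr ⟨x, hx, rfl⟩)
        simp [hne]
      rw [hrest, List.append_nil]
      simp [PySem.Dict.getD, PySem.Dict.get?, hk]
    · have h1 : kv.2.filterMap (fun r =>
          if kv.1 == "required" then some r else none) = [] := by simp [hk]
      rw [h1, List.nil_append, ih h.2]
      simp [PySem.Dict.getD, PySem.Dict.get?, hk]

-- pv_main: the inductive equivalence; the verdict below cites it.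
theorem pv_main (co : List (List (String × List String)))
    (hpre : ∀ entry ∈ co, (entry.map Prod.fst).Nodup) :
    get_conditional_requirements co = get_conditional_requirements_alt co := by
  induction co with
  | nil => rfl
  | cons e rest ih =>
    unfold get_conditional_requirements get_conditional_requirements_alt
    rw [List.flatMap_cons, pv_entry_eq e (hpre e (List.mem_cons_self ..))]
    exact congrArg _ (ih (fun x hx => hpre x (List.mem_cons_of_mem _ hx)))

-- ===== VERDICT (by name: the statement is the Claim_ definition above) =====
theorem get_conditional_requirements_spec : Claim_equal_get_conditional_requirements :=
  fun co _ hpre => pv_main co hpre
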